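-- pv_equiv track=rewrite | github.com/LeoMcH36/PythonNN | featureExtraction.py | mostCommonVowel
-- ===== SOURCE A (Python) =====
-- def mostCommonVowel(paragraph):
--
--     aCount = 0
--     eCount = 0
--     iCount = 0
--     oCount = 0
--     uCount = 0
--
--     for letter in paragraph:
--         if letter.lower() in ['a', 'á', 'à', 'â', 'ä', 'ã', 'å', 'ā', 'æ']:
--             aCount += 1
--         if letter.lower() in ['e', 'é', 'è', 'ê', 'ë', 'ẽ', 'ē', 'ę']:
--             eCount += 1
--         if letter.lower() in ['i', 'í', 'ì', 'î', 'ï', 'ĩ', 'ī']: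
--             iCount += 1
--         if letter.lower() in ['o', 'ó', 'ò', 'ô', 'ö', 'õ', 'ō', 'ø']:
--             oCount += 1
--         if letter.lower() in ['u', 'ú', 'ù', 'û', 'ü', 'ũ', 'ū']:
--             uCount += 1
--
--     counts = [aCount, eCount, iCount, oCount, uCount]
--
--     if aCount == max(counts):
--         return 1
--     if eCount == max(counts):
--         return 2
--     if iCount == max(counts):
--         return 3
--     if oCount == max(counts):
--         return 4
--     if uCount == max(counts):
--         return 5
-- ===== SOURCE B (Python) =====
-- def mostCommonVowel(paragraph):
--     # tabulate-then-aggregate: build a character frequency table in one pass,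
--     # then add each distinct character's count to its vowel group
--     freq = {}
--     for letter in paragraph:
--         freq[letter] = freq.get(letter, 0) + 1
--     groups = ['aáàâäãåāæ', 'eéèêëẽēę', 'iíìîïĩī', 'oóòôöõōø', 'uúùûüũū']
--     counts = [0, 0, 0, 0, 0]
--     for letter, n in freq.items():
--         low = letter.lower()
--         for g, vowels in enumerate(groups):
--             if low in vowels:
--                 counts[g] += n
--     return counts.index(max(counts)) + 1
-- ===== Notes on version B (the rewrite author's own statement) =====
-- stated objective: faster
-- what changed: B builds a character frequency table in one pass and aggregates only the distinct characters' counts into five vowel-group accumulators over an enumerated group list, then returns counts.index(max(counts))+1, replacing A's per-character five-way accented-list membership scan and chained max-equality returns.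
import Mathlib
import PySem

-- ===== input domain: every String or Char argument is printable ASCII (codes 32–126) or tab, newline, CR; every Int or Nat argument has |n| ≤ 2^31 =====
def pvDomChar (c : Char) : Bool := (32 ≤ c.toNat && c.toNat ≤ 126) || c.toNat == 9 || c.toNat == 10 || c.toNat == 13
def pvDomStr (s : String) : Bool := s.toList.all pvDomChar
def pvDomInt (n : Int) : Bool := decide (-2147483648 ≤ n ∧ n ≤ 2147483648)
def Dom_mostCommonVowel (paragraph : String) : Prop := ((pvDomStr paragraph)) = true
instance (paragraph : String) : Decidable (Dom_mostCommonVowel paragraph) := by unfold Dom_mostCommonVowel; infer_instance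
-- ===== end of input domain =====

-- B replaces A's per-character five-way membership scan by a frequency table built once, then
-- aggregated over the distinct characters (classification work per distinct character, not per character).

-- the five accented-vowel groups (shared spelling of the same literals both Pythons carry)
def gA : List Char := ['a', 'á', 'à', 'â', 'ä', 'ã', 'å', 'ā', 'æ']
def gE : List Char := ['e', 'é', 'è', 'ê', 'ë', 'ẽ', 'ē', 'ę']
def gI : List Char := ['i', 'í', 'ì', 'î', 'ï', 'ĩ', 'ī']
def gO : List Char := ['o', 'ó', 'ò', 'ô', 'ö', 'õ', 'ō', 'ø']
def gU : List Char := ['u', 'ú', 'ù', 'û', 'ü', 'ũ', 'ū']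

-- ===== PORT A =====
-- letter.lower() on a single character is PySem.Chars.lowerChar (exact on the ASCII domain).
-- Python's final 'if uCount == max(counts): return 5' always fires when reached (max(counts) is
-- one of the five counts), so its guard is ported as the final 'else 5'.
def mostCommonVowel (paragraph : String) : Int :=
  let st := paragraph.toList.foldl (fun st letter =>
    let l := PySem.Chars.lowerChar letter
    let a := if l ∈ gA then st.1 + 1 else st.1
    let e := if l ∈ gE then st.2.1 + 1 else st.2.1
    let i := if l ∈ gI then st.2.2.1 + 1 else st.2.2.1
    let o := if l ∈ gO then st.2.2.2.1 + 1 else st.2.2.2.1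
    let u := if l ∈ gU then st.2.2.2.2 + 1 else st.2.2.2.2
    (a, e, i, o, u)) ((0 : Int), (0 : Int), (0 : Int), (0 : Int), (0 : Int))
  let counts := [st.1, st.2.1, st.2.2.1, st.2.2.2.1, st.2.2.2.2]
  let m := (PySem.List.max? counts (fun x => x)).getD 0   -- max(counts); counts ≠ []
  if st.1 = m then 1
  else if st.2.1 = m then 2
  else if st.2.2.1 = m then 3
  else if st.2.2.2.1 = m then 4
  else 5

-- ===== PORT B =====
def pvGroups : List (List Char) := [gA, gE, gI, gO, gU]

-- freq.get(letter,0)+1 loop; counts[g] indexing is total here (g from enumerate is < 5),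
-- ported with List.set / List.getD; counts.index(max(counts)) never raises (max ∈ counts),
-- ported with PySem.List.index? … .getD 0.
def mostCommonVowel_alt (paragraph : String) : Int :=
  let freq := paragraph.toList.foldl (fun d c => d.insert c (d.getD c 0 + (1 : Int))) PySem.Dict.empty
  let counts := freq.items.foldl (fun cs p =>
      let low := PySem.Chars.lowerChar p.1
      (PySem.List.enumerate pvGroups).foldl (fun cs2 gp =>
        if low ∈ gp.2 then cs2.set gp.1.toNat (cs2.getD gp.1.toNat 0 + p.2) else cs2) cs)
    [(0 : Int), 0, 0, 0, 0]
  let m := (PySem.List.max? counts (fun x => x)).getD 0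
  (((PySem.List.index? counts m).getD 0 : Nat) : Int) + 1

-- ===== PRECONDITION & SPEC =====
def Spec_mostCommonVowel (paragraph : String) (out : Int) : Prop := out = mostCommonVowel_alt paragraph
instance (paragraph : String) (out : Int) : Decidable (Spec_mostCommonVowel paragraph out) := by unfold Spec_mostCommonVowel; infer_instance

-- ===== CLAIM (what is proved, stated in full; the proofs are below) =====
def Claim_equal_mostCommonVowel : Prop := ∀ (paragraph : String), Dom_mostCommonVowel paragraph → Spec_mostCommonVowel paragraph (mostCommonVowel paragraph)

-- ===== LEMMAS AND PROOFS =====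

-- number of characters of xs whose lowercase form lies in group g, as an Int
def cnt (g : List Char) (xs : List Char) : Int :=
  (xs.countP (fun c => decide (PySem.Chars.lowerChar c ∈ g)) : Nat)

-- A's fold computes the five group counts
lemma foldA_eq (xs : List Char) : ∀ (a e i o u : Int),
    xs.foldl (fun st letter =>
      let l := PySem.Chars.lowerChar letter
      let a := if l ∈ gA then st.1 + 1 else st.1
      let e := if l ∈ gE then st.2.1 + 1 else st.2.1
      let i := if l ∈ gI then st.2.2.1 + 1 else st.2.2.1
      let o := if l ∈ gO then st.2.2.2.1 + 1 else st.2.2.2.1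
      let u := if l ∈ gU then st.2.2.2.2 + 1 else st.2.2.2.2
      (a, e, i, o, u)) (a, e, i, o, u)
    = (a + cnt gA xs, e + cnt gE xs, i + cnt gI xs, o + cnt gO xs, u + cnt gU xs) := by
  induction xs with
  | nil => intro a e i o u; simp [cnt]
  | cons c t ih =>
    intro a e i o u
    simp only [List.foldl_cons]
    rw [ih]
    simp only [cnt, List.countP_cons, Prod.mk.injEq]
    refine ⟨?_, ?_, ?_, ?_, ?_⟩ <;> split_ifs <;> simp_all <;> ring

-- B's inner fold over the enumerated (concrete) group list, on a 5-element counts list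
lemma foldB_step (a e i o u n : Int) (k : Char) :
    (PySem.List.enumerate pvGroups).foldl (fun cs2 gp =>
        if PySem.Chars.lowerChar k ∈ gp.2 then cs2.set gp.1.toNat (cs2.getD gp.1.toNat 0 + n) else cs2)
      [a, e, i, o, u]
    = [a + (if PySem.Chars.lowerChar k ∈ gA then n else 0),
       e + (if PySem.Chars.lowerChar k ∈ gE then n else 0),
       i + (if PySem.Chars.lowerChar k ∈ gI then n else 0),
       o + (if PySem.Chars.lowerChar k ∈ gO then n else 0),
       u + (if PySem.Chars.lowerChar k ∈ gU then n else 0)] := by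
  simp only [pvGroups, PySem.List.enumerate]
  norm_num [List.foldl]
  split_ifs <;> simp [List.set]

-- contribution of a list of (key, count) pairs to group g
def contrib (g : List Char) (L : List (Char × Int)) : Int :=
  (L.map (fun p => if PySem.Chars.lowerChar p.1 ∈ g then p.2 else 0)).sum

-- B's outer fold accumulates the five contributions
lemma foldB_eq (L : List (Char × Int)) : ∀ (a e i o u : Int),
    L.foldl (fun cs p =>
      let low := PySem.Chars.lowerChar p.1
      (PySem.List.enumerate pvGroups).foldl (fun cs2 gp =>
        if low ∈ gp.2 then cs2.set gp.1.toNat (cs2.getD gp.1.toNat 0 + p.2) else cs2) cs)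
      [a, e, i, o, u]
    = [a + contrib gA L, e + contrib gE L, i + contrib gI L, o + contrib gO L, u + contrib gU L] := by
  induction L with
  | nil => intro a e i o u; simp [contrib]
  | cons q t ih =>
    intro a e i o u
    simp only [List.foldl_cons]
    rw [foldB_step, ih]
    simp only [contrib, List.map_cons, List.sum_cons]
    norm_num
    refine ⟨by ring, by ring, by ring, by ring, by ring⟩

lemma list_toFinset_sum_count_eq (l : List Char) : ∑ a ∈ l.toFinset, l.count a = l.length := by
  have := Multiset.toFinset_sum_count_eq (l : Multiset Char)
  simpa using this

-- summing the counter's per-key counts over a group recovers the per-character count (Nat level)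
lemma sum_counter_nat (p : Char → Bool) (xs : List Char) :
    ((PySem.Set.ofList xs).map (fun k => if p k then xs.count k else 0)).sum = xs.countP p := by
  have hnd : (PySem.Set.ofList xs).Nodup := PySem.Set.nodup_ofList xs
  rw [← List.sum_toFinset _ hnd]
  have hts : (PySem.Set.ofList xs).toFinset = xs.toFinset := by
    ext c; simp [PySem.Set.mem_ofList]
  rw [hts]
  have h1 : ∀ k ∈ xs.toFinset, (if p k then xs.count k else 0) = (xs.filter p).count k := by
    intro k _
    by_cases hp : p k
    · simp [hp, List.count_filter]
    · have h0 : List.count k (List.filter p xs) = 0 :=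
        List.count_eq_zero.mpr (fun hmem => hp (List.of_mem_filter hmem))
      rw [h0, if_neg hp]
  rw [Finset.sum_congr rfl h1]
  have hsub : (xs.filter p).toFinset ⊆ xs.toFinset := by
    intro c hc; simp_all
  rw [← Finset.sum_subset hsub (by
    intro x _ hnx
    rw [List.count_eq_zero]
    simp_all)]
  rw [list_toFinset_sum_count_eq]
  simp [List.countP_eq_length_filter]

-- the contribution of Counter(xs).items() to group g is cnt g xs
lemma contrib_counter (g : List Char) (xs : List Char) :
    contrib g ((PySem.Dict.counter xs).items) = cnt g xs := by
  rw [PySem.Dict.items_counter]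
  simp only [contrib, cnt, List.map_map]
  have h : ((fun p : Char × Int => if PySem.Chars.lowerChar p.1 ∈ g then p.2 else 0) ∘
        (fun k => (k, (xs.count k : Int))))
      = fun k => (((if decide (PySem.Chars.lowerChar k ∈ g) then xs.count k else 0 : Nat) : Int)) := by
    funext k
    by_cases hk : PySem.Chars.lowerChar k ∈ g <;> simp [hk]
  rw [h]
  have h2 : (List.map (fun k => (((if decide (PySem.Chars.lowerChar k ∈ g) then xs.count k else 0 : Nat) : Int))) (PySem.Set.ofList xs))
      = ((PySem.Set.ofList xs).map (fun k => if decide (PySem.Chars.lowerChar k ∈ g) then xs.count k else 0)).map (fun n : Nat => (n : Int)) := by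
    rw [List.map_map]; rfl
  rw [h2, ← Nat.cast_list_sum, sum_counter_nat]

-- the chained max-equality returns equal first-max-index + 1
lemma tail_eq (c0 c1 c2 c3 c4 : Int) :
    (let m := (PySem.List.max? [c0, c1, c2, c3, c4] (fun x => x)).getD 0
     if c0 = m then (1 : Int) else if c1 = m then 2 else if c2 = m then 3
     else if c3 = m then 4 else 5)
    = (((PySem.List.index? [c0, c1, c2, c3, c4]
          ((PySem.List.max? [c0, c1, c2, c3, c4] (fun x => x)).getD 0)).getD 0 : Nat) : Int) + 1 := by
  have hm : (PySem.List.max? [c0, c1, c2, c3, c4] (fun x => x)).getD 0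
      = max (max (max (max c0 c1) c2) c3) c4 := by
    rw [PySem.List.max?_id_cons]; simp [List.foldl]
  set m := max (max (max (max c0 c1) c2) c3) c4 with hmdef
  simp only [hm]
  by_cases h0 : c0 = m
  · rw [if_pos h0, h0, PySem.List.index?_cons_self]; simp
  · rw [if_neg h0, PySem.List.index?_cons_of_ne _ h0]
    by_cases h1 : c1 = m
    · rw [if_pos h1, h1, PySem.List.index?_cons_self]; simp
    · rw [if_neg h1, PySem.List.index?_cons_of_ne _ h1]
      by_cases h2 : c2 = m
      · rw [if_pos h2, h2, PySem.List.index?_cons_self]; simp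
      · rw [if_neg h2, PySem.List.index?_cons_of_ne _ h2]
        by_cases h3 : c3 = m
        · rw [if_pos h3, h3, PySem.List.index?_cons_self]; simp
        · rw [if_neg h3, PySem.List.index?_cons_of_ne _ h3]
          have h4 : c4 = m := by omega
          rw [h4, PySem.List.index?_cons_self]; simp

-- ===== VERDICT (by name: the statement is the Claim_ definition above) =====
theorem mostCommonVowel_spec : Claim_equal_mostCommonVowel := by
  intro paragraph _
  simp only [Spec_mostCommonVowel, mostCommonVowel, mostCommonVowel_alt]
  have hfreq : paragraph.toList.foldl (fun d c => d.insert c (d.getD c 0 + (1 : Int))) PySem.Dict.empty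
      = PySem.Dict.counter paragraph.toList :=
    PySem.Dict.foldl_insert_getD_add_one_eq_counter paragraph.toList
  rw [hfreq, foldB_eq, contrib_counter, contrib_counter, contrib_counter, contrib_counter,
    contrib_counter, foldA_eq]
  simp only [zero_add]
  exact tail_eq _ _ _ _ _
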